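-- pv_equiv track=rewrite | github.com/wangshaosheng/RADI-PR | aprkits/utils/sequence.py | _swapreplacements
-- ===== SOURCE A (Python) =====
-- from typing import List, Tuple, Optional, overload, Union
--
-- def _swapreplacements(parsedcmd: List[Tuple[str, int, Optional[int], List[str]]]):
--     _dummy = ('', -1, -1, [])
--     swapped = [
--         _prev if _curr[0] == 'insert' and _prev[0] == 'delete' and _curr[1] == _prev[1]
--         else _next if _curr[0] == 'delete' and _next[0] == 'insert' and _curr[1] == _next[1]
--         else _curr
--         for _prev, _curr, _next in zip(
--             [_dummy] + parsedcmd[:-1],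
--             parsedcmd,
--             parsedcmd[1:] + [_dummy]
--         )
--     ]
--     return swapped
-- ===== SOURCE B (Python) =====
-- def _swapreplacements(parsedcmd):
--     out = []
--     i = 0
--     n = len(parsedcmd)
--     while i < n:
--         cur = parsedcmd[i]
--         if i + 1 < n:
--             nxt = parsedcmd[i + 1]
--             if cur[0] == 'delete' and nxt[0] == 'insert' and cur[1] == nxt[1]:
--                 out.append(nxt)
--                 out.append(cur)
--                 i += 2
--                 continue
--         out.append(cur)
--         i += 1
--     return out
-- ===== Notes on version B (the rewrite author's own statement) =====
-- stated objective: simpler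
-- what changed: Replaces the zipped-triple comprehension (independent per-position decisions against prev/next neighbours with a dummy sentinel) by a greedy index loop that detects a delete/insert pair with matching index, emits the pair swapped and consumes both positions at once (i += 2).
import Mathlib
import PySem

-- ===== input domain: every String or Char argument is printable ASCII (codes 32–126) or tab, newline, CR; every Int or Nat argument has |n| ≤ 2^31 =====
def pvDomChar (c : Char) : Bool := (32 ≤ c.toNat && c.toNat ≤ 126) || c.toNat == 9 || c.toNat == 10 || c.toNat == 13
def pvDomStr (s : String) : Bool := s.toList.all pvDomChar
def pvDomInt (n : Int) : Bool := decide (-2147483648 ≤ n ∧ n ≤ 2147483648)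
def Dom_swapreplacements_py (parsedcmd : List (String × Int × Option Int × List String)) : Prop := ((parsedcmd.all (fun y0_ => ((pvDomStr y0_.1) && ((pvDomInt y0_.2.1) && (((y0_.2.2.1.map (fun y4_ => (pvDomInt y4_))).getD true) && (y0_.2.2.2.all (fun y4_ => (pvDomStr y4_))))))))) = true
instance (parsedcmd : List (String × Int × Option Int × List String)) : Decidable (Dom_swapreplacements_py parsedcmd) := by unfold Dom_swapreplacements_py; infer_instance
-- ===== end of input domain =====

-- B replaces A's zipped-triple comprehension by a greedy pair-consuming scan (same O(n) cost, simpler control flow).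

-- ===== PORT A =====
-- the sentinel _dummy = ('', -1, -1, [])
def pvDummy : String × Int × Option Int × List String := ("", -1, some (-1), [])

-- the per-position choice of A's comprehension, given (_prev, _curr, _next)
def pvChoose (t : (String × Int × Option Int × List String) ×
    (String × Int × Option Int × List String) × (String × Int × Option Int × List String)) :
    String × Int × Option Int × List String :=
  let p := t.1; let c := t.2.1; let n := t.2.2
  if c.1 = "insert" ∧ p.1 = "delete" ∧ c.2.1 = p.2.1 then p
  else if c.1 = "delete" ∧ n.1 = "insert" ∧ c.2.1 = n.2.1 then n
  else c

def swapreplacements_py (parsedcmd : List (String × Int × Option Int × List String)) : List (String × Int × Option Int × List String) :=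
  ((pvDummy :: parsedcmd.dropLast).zip (parsedcmd.zip (parsedcmd.tail ++ [pvDummy]))).map pvChoose

-- ===== PORT B =====
-- greedy scan: on a matching (delete, insert) pair emit the pair swapped and consume both, else emit one
def pvScan : List (String × Int × Option Int × List String) → List (String × Int × Option Int × List String)
  | [] => []
  | [c] => [c]
  | c :: n :: rest =>
    if c.1 = "delete" ∧ n.1 = "insert" ∧ c.2.1 = n.2.1 then n :: c :: pvScan rest
    else c :: pvScan (n :: rest)

def swapreplacements_py_alt (parsedcmd : List (String × Int × Option Int × List String)) : List (String × Int × Option Int × List String) :=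
  pvScan parsedcmd

-- ===== PRECONDITION & SPEC =====
def Spec_swapreplacements_py (parsedcmd : List (String × Int × Option Int × List String)) (out : List (String × Int × Option Int × List String)) : Prop := out = swapreplacements_py_alt parsedcmd
instance (parsedcmd : List (String × Int × Option Int × List String)) (out : List (String × Int × Option Int × List String)) : Decidable (Spec_swapreplacements_py parsedcmd out) := by unfold Spec_swapreplacements_py; infer_instance

-- ===== CLAIM (what is proved, stated in full; the proofs are below) =====
def Claim_equal_swapreplacements_py : Prop := ∀ (parsedcmd : List (String × Int × Option Int × List String)), Dom_swapreplacements_py parsedcmd → Spec_swapreplacements_py parsedcmd (swapreplacements_py parsedcmd)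

-- ===== LEMMAS AND PROOFS =====

-- A's comprehension, rewritten as a recursion carrying the previous element
def pvMapA (p : String × Int × Option Int × List String) :
    List (String × Int × Option Int × List String) → List (String × Int × Option Int × List String)
  | [] => []
  | c :: rest => pvChoose (p, c, (rest.head?.getD pvDummy)) :: pvMapA c rest

theorem pvZip_eq_mapA (p : String × Int × Option Int × List String)
    (l : List (String × Int × Option Int × List String)) :
    ((p :: l.dropLast).zip (l.zip (l.tail ++ [pvDummy]))).map pvChoose = pvMapA p l := by
  induction l generalizing p with
  | nil => simp [pvMapA]
  | cons c rest ih =>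
    cases rest with
    | nil => simp [pvMapA, pvDummy]
    | cons n rs =>
      simp only [List.dropLast_cons₂, List.tail_cons, List.cons_append, List.zip_cons_cons,
        List.map_cons, pvMapA, List.head?_cons, Option.getD_some]
      refine congrArg (pvChoose (p, c, n) :: ·) ?_
      simpa using ih c

theorem pvMapA_eq_scan (l : List (String × Int × Option Int × List String)) :
    ∀ p : String × Int × Option Int × List String,
    (∀ c, l.head? = some c → ¬ (c.1 = "insert" ∧ p.1 = "delete" ∧ c.2.1 = p.2.1)) →
    pvMapA p l = pvScan l := by
  induction l using pvScan.induct with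
  | case1 => intro p _; rfl
  | case2 c =>
    intro p hp
    have hc := hp c rfl
    simp [pvMapA, pvChoose, pvScan, pvDummy, hc]
  | case3 c n rest hpair ih =>
    intro p hp
    have hc := hp c rfl
    have h1 : pvChoose (p, c, n) = n := by
      simp [pvChoose, hpair.1, hpair.2.1, hpair.2.2]
    have h3 : pvChoose (c, n, rest.head?.getD pvDummy) = c := by
      simp [pvChoose, hpair.1, hpair.2.1, hpair.2.2.symm]
    have h4 : pvMapA n rest = pvScan rest := by
      refine ih n ?_
      intro x hx hcontra
      have hni : n.1 = "insert" := hpair.2.1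
      rw [hcontra.2.1] at hni
      simp at hni
    simp only [pvMapA, pvScan, if_pos hpair, List.head?_cons, Option.getD_some, h1, h3, h4]
  | case4 c n rest hpair ih =>
    intro p hp
    have hc := hp c rfl
    have h4 : pvMapA c (n :: rest) = pvScan (n :: rest) := by
      refine ih c ?_
      intro x hx hcontra
      have hxn : n = x := by simpa using hx
      subst hxn
      exact hpair ⟨hcontra.2.1, hcontra.1, hcontra.2.2.symm⟩
    have h1 : pvChoose (p, c, n) = c := by
      simp only [pvChoose]
      rw [if_neg hc, if_neg]
      intro h; exact hpair h
    calc pvMapA p (c :: n :: rest) = pvChoose (p, c, n) :: pvMapA c (n :: rest) := rfl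
    _ = c :: pvScan (n :: rest) := by rw [h1, h4]
    _ = pvScan (c :: n :: rest) := by rw [pvScan, if_neg hpair]

-- ===== VERDICT (by name: the statement is the Claim_ definition above) =====
theorem swapreplacements_py_spec : Claim_equal_swapreplacements_py := by
  intro l _
  show swapreplacements_py l = swapreplacements_py_alt l
  rw [swapreplacements_py, swapreplacements_py_alt, pvZip_eq_mapA]
  exact pvMapA_eq_scan l pvDummy (by intro c _ h; simp [pvDummy] at h)
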